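-- pv_equiv track=rewrite | github.com/karolinakasperek/pypw-kk-2023 | examplepy.py | sweep_max
-- ===== SOURCE A (Python) =====
-- def sweep_max(items: list) -> list:
--     max_item = items[0]
--     max_pos = 0
--     for i in range(len(items)):
--         if max_item <= items[i]:
--             max_item = items[i]
--             max_pos = i
--     items[max_pos] = items[0]
--     items[0] = max_item
--     return items
--
-- items = [0, 8, 10, 2, 20, 10]
-- ===== SOURCE B (Python) =====
-- def sweep_max(items: list) -> list:
--     first = items[0]
--     m = max(items)
--     pos = len(items) - 1 - items[::-1].index(m)
--     items[0], items[pos] = items[pos], items[0]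
--     return items
-- ===== Notes on version B (the rewrite author's own statement) =====
-- stated objective: idiomatic
-- what changed: Replaces A's fused running-max/position index loop with built-ins: max(items) for the value plus a reversed-list index() to locate the last occurrence, then a single tuple swap.
import Mathlib
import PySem

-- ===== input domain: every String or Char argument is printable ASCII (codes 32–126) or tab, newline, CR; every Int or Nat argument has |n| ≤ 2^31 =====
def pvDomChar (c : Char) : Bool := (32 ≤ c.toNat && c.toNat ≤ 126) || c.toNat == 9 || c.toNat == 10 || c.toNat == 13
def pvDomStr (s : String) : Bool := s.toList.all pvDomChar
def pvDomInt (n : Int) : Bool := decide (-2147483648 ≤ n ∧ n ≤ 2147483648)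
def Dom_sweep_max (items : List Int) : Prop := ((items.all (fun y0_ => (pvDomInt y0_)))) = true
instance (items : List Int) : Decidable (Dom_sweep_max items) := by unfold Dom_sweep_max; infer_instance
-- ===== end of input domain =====

-- B swaps the last occurrence of the maximum to the front using max() and a reversed-list index()
-- instead of A's fused running-max/position scan (idiomatic; both Pythons mutate `items` in place —
-- the equivalence proved here is about the return value).

-- ===== PORT A =====
def sweep_max (items : List Int) : List Int :=
  let max_item := PySem.List.pyGetD items 0 0          -- items[0]; Pre_ excludes []
  let st := (PySem.List.pyRange 0 (items.length : Int) 1).foldl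
      (fun (st : Int × Int) i =>
        if st.1 ≤ PySem.List.pyGetD items i 0 then (PySem.List.pyGetD items i 0, i) else st)
      (max_item, 0)
  PySem.List.pySetD (PySem.List.pySetD items st.2 (PySem.List.pyGetD items 0 0)) 0 st.1

-- ===== PORT B =====
def sweep_max_alt (items : List Int) : List Int :=
  let first := PySem.List.pyGetD items 0 0             -- items[0]; Pre_ excludes []
  let m := (PySem.List.max? items (fun y => y)).getD 0 -- max(items)
  -- items[::-1] is items.reverse (PySem.List.slice?_none_none_neg_one); .index never fails since m ∈ items
  let pos : Int := (items.length : Int) - 1 - ((PySem.List.index? items.reverse m).getD 0 : Nat)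
  PySem.List.pySetD (PySem.List.pySetD items 0 m) pos first

-- ===== PRECONDITION & SPEC =====
-- A raises IndexError on the empty list (items[0]); Pre_ excludes exactly that input.
def Pre_sweep_max (items : List Int) : Prop := items ≠ []
instance (items : List Int) : Decidable (Pre_sweep_max items) := by unfold Pre_sweep_max; infer_instance
def pvWitness_sweep_max : List Int := [0, 8, 10, 2, 20, 10]

def Spec_sweep_max (items : List Int) (out : List Int) : Prop := out = sweep_max_alt items
instance (items : List Int) (out : List Int) : Decidable (Spec_sweep_max items out) := by unfold Spec_sweep_max; infer_instance

-- ===== CLAIM (what is proved, stated in full; the proofs are below) =====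
def Claim_equal_sweep_max : Prop := ∀ (items : List Int), Dom_sweep_max items → Pre_sweep_max items → Spec_sweep_max items (sweep_max items)

-- ===== LEMMAS AND PROOFS =====

-- A's loop on h :: t computes the maximum together with the index of its LAST occurrence,
-- written exactly in the form B computes it (length - 1 - position of the max in the reversed list).
theorem sweep_max_fold_key (t : List Int) (h : Int) :
    (PySem.List.pyRange 0 ((h :: t).length : Int) 1).foldl
      (fun (st : Int × Int) i =>
        if st.1 ≤ PySem.List.pyGetD (h :: t) i 0 then (PySem.List.pyGetD (h :: t) i 0, i) else st)
      (h, 0)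
    = (t.foldl max h,
       ((h :: t).length : Int) - 1 -
         (((PySem.List.index? (h :: t).reverse (t.foldl max h)).getD 0 : Nat) : Int)) := by
  induction t using List.reverseRecOn with
  | nil =>
      simp [PySem.List.pyRange_one, List.range_succ, PySem.List.index?_eq_idxOf?]
  | append_singleton t' x ih =>
      have hlenN : (h :: (t' ++ [x])).length = (h :: t').length + 1 := by simp
      have hlen : ((h :: (t' ++ [x])).length : Int) = ((h :: t').length : Int) + 1 := by
        rw [hlenN]; push_cast; ring
      rw [hlen, PySem.List.pyRange_one_succ_right (by positivity)]
      rw [List.foldl_append]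
      have hcongr :
          (PySem.List.pyRange 0 ((h :: t').length : Int) 1).foldl
            (fun (st : Int × Int) i =>
              if st.1 ≤ PySem.List.pyGetD (h :: (t' ++ [x])) i 0 then
                (PySem.List.pyGetD (h :: (t' ++ [x])) i 0, i) else st)
            (h, 0)
          = (PySem.List.pyRange 0 ((h :: t').length : Int) 1).foldl
            (fun (st : Int × Int) i =>
              if st.1 ≤ PySem.List.pyGetD (h :: t') i 0 then
                (PySem.List.pyGetD (h :: t') i 0, i) else st)
            (h, 0) := by
        apply List.foldl_ext
        intro acc i hi
        rw [PySem.List.mem_pyRange_one] at hi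
        have h1 : PySem.List.pyGetD (h :: (t' ++ [x])) i 0 = PySem.List.pyGetD (h :: t') i 0 := by
          rw [PySem.List.pyGetD_eq_getElem _ 0 hi.1 (by rw [hlenN]; push_cast; have := hi.2; omega),
              PySem.List.pyGetD_eq_getElem _ 0 hi.1 (by exact_mod_cast hi.2)]
          have hi2 : i.toNat < (h :: t').length := by have := hi.2; omega
          exact List.getElem_append_left hi2
        rw [h1]
      rw [hcongr, ih]
      -- the extra step at index (h :: t').length
      have hx : PySem.List.pyGetD (h :: (t' ++ [x])) ((h :: t').length : Int) 0 = x := by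
        rw [PySem.List.pyGetD_natCast]
        simp [List.getD_eq_getElem?_getD]
      simp only [List.foldl_cons, List.foldl_nil, hx]
      set m' := t'.foldl max h with hm'
      have hmax : (t' ++ [x]).foldl max h = max m' x := by
        rw [List.foldl_append]; rfl
      have hrev : (h :: (t' ++ [x])).reverse = x :: (h :: t').reverse := by simp
      by_cases hle : m' ≤ x
      · simp only [if_pos hle, hmax, max_eq_right hle, hrev,
          PySem.List.index?_cons_self]
        simp
      · have hxm : x ≠ max m' x := by
          rw [max_eq_left (le_of_lt (not_le.mp hle))]; omega
        simp only [if_neg hle, hmax, max_eq_left (le_of_lt (not_le.mp hle)), hrev]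
        rw [PySem.List.index?_cons_of_ne _ (by rw [max_eq_left (le_of_lt (not_le.mp hle))] at hxm; exact hxm)]
        have hmem : m' ∈ (h :: t').reverse := by
          rcases PySem.List.foldl_max_mem t' h with h1 | h1
          · rw [List.mem_reverse, hm', h1]; exact List.mem_cons_self
          · exact List.mem_reverse.mpr (List.mem_cons_of_mem _ h1)
        obtain ⟨j, hj⟩ := Option.isSome_iff_exists.mp ((PySem.List.index?_isSome_iff _ _).mpr hmem)
        rw [hj]
        simp only [Option.map_some, Option.getD_some, Prod.mk.injEq]
        refine ⟨trivial, by push_cast [List.length_append]; ring⟩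

theorem sweep_max_main (items : List Int) (hne : items ≠ []) : sweep_max items = sweep_max_alt items := by
  obtain ⟨h, t, rfl⟩ : ∃ h t, items = h :: t := by
    cases items with | nil => exact absurd rfl hne | cons a b => exact ⟨a, b, rfl⟩
  simp only [sweep_max, sweep_max_alt, PySem.List.pyGetD_zero_cons,
    PySem.List.max?_id_cons, Option.getD_some, sweep_max_fold_key]
  set m := t.foldl max h with hm
  have hmem : m ∈ (h :: t).reverse := by
    rcases PySem.List.foldl_max_mem t h with h1 | h1
    · rw [List.mem_reverse, hm, h1]; exact List.mem_cons_self
    · exact List.mem_reverse.mpr (List.mem_cons_of_mem _ h1)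
  obtain ⟨j, hj⟩ := Option.isSome_iff_exists.mp ((PySem.List.index?_isSome_iff _ _).mpr hmem)
  obtain ⟨hjlt, hjget, -⟩ := PySem.List.getElem_of_index?_eq_some hj
  rw [hj]
  simp only [Option.getD_some]
  have hjlt' : j < (h :: t).length := by simpa using hjlt
  set p : Int := ((h :: t).length : Int) - 1 - (j : Int) with hp
  have hp0 : 0 ≤ p := by
    rw [hp]; simp only [List.length_cons] at hjlt' ⊢; push_cast; omega
  rw [PySem.List.pySetD_of_nonneg (h :: t) h hp0]
  rw [PySem.List.pySetD_of_nonneg ((h :: t).set p.toNat h) m (by norm_num)]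
  rw [PySem.List.pySetD_of_nonneg (h :: t) m (by norm_num)]
  rw [PySem.List.pySetD_of_nonneg ((h :: t).set (0:Int).toNat m) h hp0]
  simp only [Int.toNat_zero]
  by_cases hpz : p.toNat = 0
  · have hj' : j = (h :: t).length - 1 := by simp at hjlt'; omega
    have hhm : m = h := by
      have := hjget
      rw [List.getElem_reverse] at this
      simp only [hj'] at this
      simpa using this.symm
    rw [hpz, hhm]
  · exact List.set_comm h m hpz

-- ===== VERDICT (by name: the statement is the Claim_ definition above) =====
theorem sweep_max_spec : Claim_equal_sweep_max := by
  intro items _ hpre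
  unfold Spec_sweep_max
  exact sweep_max_main items hpre
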